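-- pv_equiv track=rewrite | github.com/ewsc/MachineLearningMethods_Labs | LabUno/ParteUno/1.1.4.py | find_largest_odd_and_min_abs
-- ===== SOURCE A (Python) =====
-- def find_largest_odd_and_min_abs(numbers):
--     largest_odd = None
--     min_abs = None
--
--     for num in numbers:
--         if num % 2 != 0:
--             if largest_odd is None or num > largest_odd:
--                 largest_odd = num
--
--         if min_abs is None or abs(num) < abs(min_abs):
--             min_abs = num
--
--     return largest_odd, min_abs
-- ===== SOURCE B (Python) =====
-- def find_largest_odd_and_min_abs(numbers):
--     odds_desc = sorted((x for x in numbers if x % 2 != 0), reverse=True)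
--     by_abs = sorted(numbers, key=abs)
--     return (odds_desc[0] if odds_desc else None,
--             by_abs[0] if by_abs else None)
-- ===== Notes on version B (the rewrite author's own statement) =====
-- stated objective: alternative
-- what changed: Replaces the single running-best scan with a sort-based strategy: sort the odd elements in descending order and sort the whole list by absolute value (both stable), then take the head of each sorted list.
import Mathlib
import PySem

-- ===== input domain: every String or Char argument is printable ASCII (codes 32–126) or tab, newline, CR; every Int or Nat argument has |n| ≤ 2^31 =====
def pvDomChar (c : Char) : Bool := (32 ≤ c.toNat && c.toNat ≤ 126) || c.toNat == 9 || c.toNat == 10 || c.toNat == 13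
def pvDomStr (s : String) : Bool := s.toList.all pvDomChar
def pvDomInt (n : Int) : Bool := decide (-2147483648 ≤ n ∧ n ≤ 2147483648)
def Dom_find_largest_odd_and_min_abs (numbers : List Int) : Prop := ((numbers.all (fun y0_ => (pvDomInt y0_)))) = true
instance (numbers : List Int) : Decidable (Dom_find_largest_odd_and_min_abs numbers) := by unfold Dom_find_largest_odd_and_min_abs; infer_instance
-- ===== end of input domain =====

-- B replaces A's single running-best scan by a sort-based strategy: stable-sort the odds descending and the whole list by absolute value, then take the head of each — alternative algorithm, same results.

-- ===== PORT A =====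
def find_largest_odd_and_min_abs (numbers : List Int) : Option Int × Option Int :=
  numbers.foldl
    (fun st num =>
      let lo :=
        if PySem.Int.mod num 2 ≠ 0 then
          match st.1 with
          | none => some num
          | some l => if num > l then some num else some l
        else st.1
      let ma :=
        match st.2 with
        | none => some num
        | some m => if |num| < |m| then some num else some m
      (lo, ma))
    (none, none)

-- ===== PORT B =====
-- B: sort the odd elements descending, sort all elements by |·| (stable), return the heads (return value only)
def find_largest_odd_and_min_abs_alt (numbers : List Int) : Option Int × Option Int :=
  let odds_desc := PySem.List.sorted (numbers.filter (fun x => PySem.Int.mod x 2 ≠ 0)) (fun x => x) true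
  let by_abs := PySem.List.sorted numbers (fun x => |x|) false
  (odds_desc.head?, by_abs.head?)

-- ===== PRECONDITION & SPEC =====
def Spec_find_largest_odd_and_min_abs (numbers : List Int) (out : Option Int × Option Int) : Prop := out = find_largest_odd_and_min_abs_alt numbers
instance (numbers : List Int) (out : Option Int × Option Int) : Decidable (Spec_find_largest_odd_and_min_abs numbers out) := by unfold Spec_find_largest_odd_and_min_abs; infer_instance

-- ===== CLAIM (what is proved, stated in full; the proofs are below) =====
def Claim_equal_find_largest_odd_and_min_abs : Prop := ∀ (numbers : List Int), Dom_find_largest_odd_and_min_abs numbers → Spec_find_largest_odd_and_min_abs numbers (find_largest_odd_and_min_abs numbers)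

-- ===== LEMMAS AND PROOFS =====

-- the running-best step that the head of an insertion-sort fold obeys
def pvStep (before : Int → Int → Bool) (h : Option Int) (x : Int) : Option Int :=
  match h with
  | none => some x
  | some y => if before x y then some x else some y

theorem head_insertBy (before : Int → Int → Bool) (x : Int) (acc : List Int) :
    (PySem.List.insertBy before x acc).head? = pvStep before acc.head? x := by
  cases acc with
  | nil => rfl
  | cons y ys =>
    show (if before x y then x :: y :: ys else y :: PySem.List.insertBy before x ys).head? = _
    by_cases hb : before x y <;> simp [hb, pvStep]

theorem head_foldl_insertBy (before : Int → Int → Bool) (xs : List Int) (acc : List Int) :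
    (xs.foldl (fun a x => PySem.List.insertBy before x a) acc).head?
      = xs.foldl (pvStep before) acc.head? := by
  induction xs generalizing acc with
  | nil => rfl
  | cons h t ih =>
    simp only [List.foldl_cons]
    rw [ih, head_insertBy]

-- A's fused loop splits into the two running-best folds
theorem fused_eq_pair (numbers : List Int) (lo ma : Option Int) :
    numbers.foldl
      (fun st num =>
        let lo' :=
          if PySem.Int.mod num 2 ≠ 0 then
            match st.1 with
            | none => some num
            | some l => if num > l then some num else some l
          else st.1
        let ma' :=
          match st.2 with
          | none => some num
          | some m => if |num| < |m| then some num else some m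
        (lo', ma'))
      (lo, ma)
    = ((numbers.filter (fun x => PySem.Int.mod x 2 ≠ 0)).foldl
        (pvStep (fun a b => decide (b < a))) lo,
       numbers.foldl (pvStep (fun a b => decide (|a| < |b|))) ma) := by
  induction numbers generalizing lo ma with
  | nil => rfl
  | cons h t ih =>
    simp only [List.foldl_cons, List.filter_cons]
    rw [ih]
    by_cases hodd : PySem.Int.mod h 2 ≠ 0
    · rw [if_pos hodd, if_pos (decide_eq_true hodd), List.foldl_cons]
      cases lo <;> cases ma <;> simp [pvStep, gt_iff_lt]
    · rw [if_neg hodd, if_neg (show ¬decide (PySem.Int.mod h 2 ≠ 0) = true by simpa using hodd)]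
      cases ma <;> simp [pvStep]

-- ===== VERDICT (by name: the statement is the Claim_ definition above) =====
theorem find_largest_odd_and_min_abs_spec : Claim_equal_find_largest_odd_and_min_abs := by
  intro numbers _
  unfold Spec_find_largest_odd_and_min_abs find_largest_odd_and_min_abs
    find_largest_odd_and_min_abs_alt PySem.List.sorted
  simp only []
  rw [fused_eq_pair, head_foldl_insertBy, head_foldl_insertBy]
  rfl
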